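-- pv_equiv track=rewrite | github.com/Harito97/PythonAndScratch3Tutorial | ThiTinHocTre/Archived/2024_03_28/Bài 1.py | double
-- ===== SOURCE A (Python) =====
-- def double(n: int):
--     if n == 0:
--         return 1
--     multiple = 1
--     for i in range(n, 0, -2):
--         multiple *= i
--     if n % 2 == 0:
--         multiple *= -1
--     return multiple
-- ===== SOURCE B (Python) =====
-- def double(n: int):
--     if n == 0:
--         return 1
--     terms = list(range(n, 0, -2))
--
--     def prod(lo, hi):
--         if hi - lo == 0:
--             return 1
--         if hi - lo == 1:
--             return terms[lo]
--         mid = (lo + hi) // 2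
--         return prod(lo, mid) * prod(mid, hi)
--
--     p = prod(0, len(terms))
--     return -p if n % 2 == 0 else p
-- ===== Notes on version B (the rewrite author's own statement) =====
-- stated objective: alternative
-- what changed: replaces the linear left-to-right accumulation loop with a balanced divide-and-conquer product over the materialised term list (split at midpoint, recurse, multiply the subproducts)
import Mathlib
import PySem

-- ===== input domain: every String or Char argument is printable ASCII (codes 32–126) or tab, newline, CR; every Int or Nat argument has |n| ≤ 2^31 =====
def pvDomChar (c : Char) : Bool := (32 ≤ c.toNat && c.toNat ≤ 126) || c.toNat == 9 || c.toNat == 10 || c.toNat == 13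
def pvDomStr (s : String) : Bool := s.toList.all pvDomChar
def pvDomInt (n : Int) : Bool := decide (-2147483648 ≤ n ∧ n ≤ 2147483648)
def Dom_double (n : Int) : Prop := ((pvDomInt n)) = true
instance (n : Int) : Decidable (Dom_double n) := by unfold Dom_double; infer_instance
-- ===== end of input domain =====

-- B replaces A's linear accumulation loop by a balanced divide-and-conquer product over the same term list (alternative decomposition, not faster).

-- ===== PORT A =====
def double (n : Int) : Int :=
  if n = 0 then 1
  else
    let multiple := (PySem.List.pyRange n 0 (-2)).foldl (fun a i => a * i) 1
    if PySem.Int.mod n 2 = 0 then multiple * (-1) else multiple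

-- ===== PORT B =====
-- divide-and-conquer product: empty → 1, singleton → the element, else split at midpoint
def dcProd : List Int → Int
  | [] => 1
  | [x] => x
  | x :: y :: rest =>
    let xs := x :: y :: rest
    let m := xs.length / 2
    dcProd (xs.take m) * dcProd (xs.drop m)
termination_by xs => xs.length
decreasing_by
  · simp only [List.length_take, List.length_cons]
    omega
  · simp only [List.length_drop, List.length_cons]
    omega

def double_alt (n : Int) : Int :=
  if n = 0 then 1
  else
    let terms := PySem.List.pyRange n 0 (-2)
    let p := dcProd terms
    if PySem.Int.mod n 2 = 0 then -p else p

-- ===== PRECONDITION & SPEC =====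
def Spec_double (n : Int) (out : Int) : Prop := out = double_alt n
instance (n : Int) (out : Int) : Decidable (Spec_double n out) := by unfold Spec_double; infer_instance

-- ===== CLAIM (what is proved, stated in full; the proofs are below) =====
def Claim_equal_double : Prop := ∀ (n : Int), Dom_double n → Spec_double n (double n)

-- ===== LEMMAS AND PROOFS =====

theorem dcProd_eq_prod (xs : List Int) : dcProd xs = xs.prod := by
  induction hn : xs.length using Nat.strong_induction_on generalizing xs with
  | _ n ih =>
    match xs with
    | [] => simp [dcProd]
    | [x] => simp [dcProd]
    | x :: y :: rest =>
      rw [dcProd]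
      set xs' := x :: y :: rest with hxs
      have hl : xs'.length = n := hn
      have h2 : 2 ≤ n := by
        have := hn
        simp only [hxs, List.length_cons] at this
        omega
      have ht : (xs'.take (xs'.length / 2)).length = xs'.length / 2 := by
        rw [List.length_take]; omega
      have hd : (xs'.drop (xs'.length / 2)).length = xs'.length - xs'.length / 2 := by
        rw [List.length_drop]
      rw [ih _ (by omega) _ ht, ih _ (by omega) _ hd]
      rw [← List.prod_append, List.take_append_drop]

theorem foldl_mul_eq_prod (xs : List Int) (a : Int) :
    xs.foldl (fun a i => a * i) a = a * xs.prod := by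
  induction xs generalizing a with
  | nil => simp
  | cons x t ih => simp [List.foldl, ih, mul_assoc]

-- ===== VERDICT (by name: the statement is the Claim_ definition above) =====
theorem double_spec : Claim_equal_double := by
  intro n _
  unfold Spec_double double double_alt
  by_cases h0 : n = 0
  · simp [h0]
  · simp only [h0, if_false]
    rw [foldl_mul_eq_prod, one_mul, dcProd_eq_prod]
    by_cases hm : PySem.Int.mod n 2 = 0 <;> simp [mul_comm]
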